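-- pv_equiv track=rewrite | github.com/DumkinMaksim/PySim3_H_Work | taskZ.py | Fiba_negativ
-- ===== SOURCE A (Python) =====
-- def Fiba_negativ(arg2)->list:
--     '''
--     Вывод отрицательного ряда Фибаначи
--     '''
--     f_negativ=[]
--     fib_k1=1
--     fib_k2=-1
--     for i in range(arg2):
--         if i==0: f_negativ.insert(i,fib_k1)
--         elif i==1: f_negativ.insert(i,fib_k2)
--         else:
--             f_negativ.insert(i,fib_k1-fib_k2)
--             temp=fib_k2
--             fib_k2=fib_k1-fib_k2
--             fib_k1=temp
--
--     return f_negativ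
-- ===== SOURCE B (Python) =====
-- def Fiba_negativ(arg2) -> list:
--     '''Negafibonacci series via positive Fibonacci pair and an alternating sign.'''
--     res = []
--     a, b = 1, 1
--     sign = 1
--     for _ in range(arg2):
--         res.append(a * sign)
--         a, b = b, a + b
--         sign = -sign
--     return res
-- ===== Notes on version B (the rewrite author's own statement) =====
-- stated objective: idiomatic
-- what changed: B maintains the positive Fibonacci pair with the additive recurrence plus an alternating sign toggle (the negafibonacci identity), instead of A's subtraction recurrence with special branches for the first two indices and insert-at-index.
import Mathlib
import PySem

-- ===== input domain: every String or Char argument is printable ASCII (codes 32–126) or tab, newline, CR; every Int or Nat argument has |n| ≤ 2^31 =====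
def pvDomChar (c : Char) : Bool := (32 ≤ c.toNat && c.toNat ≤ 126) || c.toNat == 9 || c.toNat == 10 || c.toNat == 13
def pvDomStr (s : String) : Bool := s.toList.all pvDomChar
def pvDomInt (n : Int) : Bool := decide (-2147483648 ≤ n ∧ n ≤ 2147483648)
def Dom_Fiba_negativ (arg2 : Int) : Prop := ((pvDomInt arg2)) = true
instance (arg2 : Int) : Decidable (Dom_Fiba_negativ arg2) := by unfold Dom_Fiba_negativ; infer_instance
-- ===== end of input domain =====

-- B replaces A's subtraction recurrence and its special first-two-index branches by the positive Fibonacci pair with an alternating sign toggle (idiomatic, same cost).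

-- ===== PORT A =====
def pvStepA : List Int × Int × Int → Int → List Int × Int × Int
  | (l, k1, k2), i =>
    if i = 0 then (PySem.List.insert l i k1, k1, k2)
    else if i = 1 then (PySem.List.insert l i k2, k1, k2)
    else (PySem.List.insert l i (k1 - k2), k2, k1 - k2)

def Fiba_negativ (arg2 : Int) : List Int :=
  ((PySem.List.pyRange 0 arg2 1).foldl pvStepA ([], 1, -1)).1

-- ===== PORT B =====
def pvStepB : List Int × Int × Int × Int → Int → List Int × Int × Int × Int
  | (res, a, b, s), _ => (res ++ [a * s], b, a + b, -s)

def Fiba_negativ_alt (arg2 : Int) : List Int :=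
  ((PySem.List.pyRange 0 arg2 1).foldl pvStepB ([], 1, 1, 1)).1

-- ===== PRECONDITION & SPEC =====
def Spec_Fiba_negativ (arg2 : Int) (out : List Int) : Prop := out = Fiba_negativ_alt arg2
instance (arg2 : Int) (out : List Int) : Decidable (Spec_Fiba_negativ arg2 out) := by unfold Spec_Fiba_negativ; infer_instance

-- ===== CLAIM (what is proved, stated in full; the proofs are below) =====
def Claim_equal_Fiba_negativ : Prop := ∀ (arg2 : Int), Dom_Fiba_negativ arg2 → Spec_Fiba_negativ arg2 (Fiba_negativ arg2)

-- ===== LEMMAS AND PROOFS =====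

-- Invariant after n ≥ 2 loop iterations: same list of length n, and A's pair
-- (fib_k1, fib_k2) = (s*(2a-b), -s*(b-a)) in terms of B's (a, b, s).
theorem pv_inv (n : Nat) :
    ∃ l a b s,
      (PySem.List.pyRange 0 ((n + 2 : Nat) : Int) 1).foldl pvStepB ([], 1, 1, 1) = (l, a, b, s) ∧
      (PySem.List.pyRange 0 ((n + 2 : Nat) : Int) 1).foldl pvStepA ([], 1, -1)
        = (l, s * (2 * a - b), -s * (b - a)) ∧
      l.length = n + 2 := by
  induction n with
  | zero => exact ⟨[1, -1], 2, 3, 1, by decide, by decide, by decide⟩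
  | succ k ih =>
    obtain ⟨l, a, b, s, hB, hA, hlen⟩ := ih
    have hsplit : PySem.List.pyRange 0 ((k + 3 : Nat) : Int) 1
        = PySem.List.pyRange 0 ((k + 2 : Nat) : Int) 1 ++ [((k + 2 : Nat) : Int)] := by
      have := PySem.List.pyRange_one_succ_right (a := 0) (b := ((k + 2 : Nat) : Int))
        (by exact_mod_cast Nat.zero_le _)
      rw [← this]; congr 1
    have hi0 : ((k + 2 : Nat) : Int) ≠ 0 := by omega
    have hi1 : ((k + 2 : Nat) : Int) ≠ 1 := by omega
    have hins : PySem.List.insert l ((k + 2 : Nat) : Int)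
        (s * (2 * a - b) - -s * (b - a)) = l ++ [s * (2 * a - b) - -s * (b - a)] := by
      rw [PySem.List.insert_natCast l (k + 2) _ (by omega)]
      rw [show l.take (k + 2) = l.take l.length by rw [hlen],
          show l.drop (k + 2) = l.drop l.length by rw [hlen]]
      simp
    refine ⟨l ++ [a * s], b, a + b, -s, ?_, ?_, ?_⟩
    · rw [hsplit, List.foldl_append, hB]; rfl
    · rw [hsplit, List.foldl_append, hA]
      simp only [List.foldl_cons, List.foldl_nil, pvStepA, if_neg hi0, if_neg hi1, hins]
      have hval : s * (2 * a - b) - -s * (b - a) = a * s := by ring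
      rw [hval]
      refine Prod.ext rfl (Prod.ext ?_ ?_) <;> ring
    · simp [hlen]

-- ===== VERDICT (by name: the statement is the Claim_ definition above) =====
theorem Fiba_negativ_spec : Claim_equal_Fiba_negativ := by
  intro arg2 _
  unfold Spec_Fiba_negativ Fiba_negativ Fiba_negativ_alt
  by_cases h : arg2 ≤ 0
  · rw [PySem.List.pyRange_one_eq_nil (by omega)]
    rfl
  · push Not at h
    have harg : arg2 = (arg2.toNat : Int) := by omega
    rw [harg]
    match hn : arg2.toNat with
    | 0 => rfl
    | 1 => rfl
    | k + 2 =>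
      obtain ⟨l, a, b, s, hB, hA, _⟩ := pv_inv k
      rw [hA, hB]
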